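-- pv_equiv track=rewrite | github.com/PouyaGohari/Parametric-NonParametric-Tests | Code/problem20.py | calculate_d_i
-- ===== SOURCE A (Python) =====
-- def calculate_d_i(sample, hypothesis_median):
--     negative, positive, zeros =0 ,0, 0
--     for x in sample:
--         if x < hypothesis_median:
--             negative += 1
--         elif x > hypothesis_median:
--             positive += 1
--         else:
--             zeros += 1
--     if zeros == 0:
--         return positive, negative
--     while(zeros != 0):
--         if(positive > negative):
--             negative += 1
--         elif(positive < negative):
--             positive += 1
--         else:
--             break
--         zeros -= 1
--     return positive, negative
-- ===== SOURCE B (Python) =====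
-- def calculate_d_i(sample, hypothesis_median):
--     positive = len([x for x in sample if x > hypothesis_median])
--     negative = len([x for x in sample if x < hypothesis_median])
--     zeros = len(sample) - positive - negative
--     if positive > negative:
--         negative += min(zeros, positive - negative)
--     elif positive < negative:
--         positive += min(zeros, negative - positive)
--     return positive, negative
-- ===== Notes on version B (the rewrite author's own statement) =====
-- stated objective: simpler
-- what changed: The while-loop that hands out ties one by one is replaced by closed-form arithmetic (add min(zeros, |positive-negative|) to the smaller count), and counting is done with filters instead of a stateful if/elif loop.
import Mathlib
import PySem

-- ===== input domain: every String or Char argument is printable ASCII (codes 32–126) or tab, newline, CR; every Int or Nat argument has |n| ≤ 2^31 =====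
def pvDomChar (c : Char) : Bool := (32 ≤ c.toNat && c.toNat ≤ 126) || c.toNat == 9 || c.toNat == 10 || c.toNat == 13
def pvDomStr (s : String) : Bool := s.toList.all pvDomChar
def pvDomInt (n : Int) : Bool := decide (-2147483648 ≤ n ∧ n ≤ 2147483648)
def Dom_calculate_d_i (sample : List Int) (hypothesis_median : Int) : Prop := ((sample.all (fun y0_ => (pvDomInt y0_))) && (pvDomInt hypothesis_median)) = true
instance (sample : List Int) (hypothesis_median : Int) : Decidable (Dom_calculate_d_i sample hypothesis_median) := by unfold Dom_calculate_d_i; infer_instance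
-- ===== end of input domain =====

-- B replaces A's step-by-step tie-distribution while-loop with closed-form min arithmetic (objective: simpler).


-- ===== PORT A =====
-- the while-loop of A: zeros (a nonnegative count) is the fuel; `break` when positive = negative
def calcLoopA (positive negative : Int) (zeros : Nat) : Int × Int :=
  match zeros with
  | 0 => (positive, negative)
  | z + 1 =>
    if negative < positive then calcLoopA positive (negative + 1) z
    else if positive < negative then calcLoopA (positive + 1) negative z
    else (positive, negative)

def calculate_d_i (sample : List Int) (hypothesis_median : Int) : Int × Int :=
  let t : Int × Int × Int :=
    sample.foldl (fun s x =>
      if x < hypothesis_median then (s.1 + 1, s.2.1, s.2.2)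
      else if hypothesis_median < x then (s.1, s.2.1 + 1, s.2.2)
      else (s.1, s.2.1, s.2.2 + 1)) (0, 0, 0)
  let negative := t.1
  let positive := t.2.1
  let zeros := t.2.2
  if zeros = 0 then (positive, negative)
  else calcLoopA positive negative zeros.toNat

-- ===== PORT B =====
def calculate_d_i_alt (sample : List Int) (hypothesis_median : Int) : Int × Int :=
  let positive : Int := (sample.filter (fun x => hypothesis_median < x)).length
  let negative : Int := (sample.filter (fun x => x < hypothesis_median)).length
  let zeros : Int := (sample.length : Int) - positive - negative
  if negative < positive then (positive, negative + min zeros (positive - negative))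
  else if positive < negative then (positive + min zeros (negative - positive), negative)
  else (positive, negative)

-- ===== PRECONDITION & SPEC =====
def Spec_calculate_d_i (sample : List Int) (hypothesis_median : Int) (out : Int × Int) : Prop := out = calculate_d_i_alt sample hypothesis_median
instance (sample : List Int) (hypothesis_median : Int) (out : Int × Int) : Decidable (Spec_calculate_d_i sample hypothesis_median out) := by unfold Spec_calculate_d_i; infer_instance

-- ===== CLAIM (what is proved, stated in full; the proofs are below) =====
def Claim_equal_calculate_d_i : Prop := ∀ (sample : List Int) (hypothesis_median : Int), Dom_calculate_d_i sample hypothesis_median → Spec_calculate_d_i sample hypothesis_median (calculate_d_i sample hypothesis_median)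

-- ===== LEMMAS AND PROOFS =====

-- counting fold of A = the filter counts of B (zeros = length - pos - neg)
theorem calc_fold_eq (m : Int) (sample : List Int) (a b c : Int) :
    sample.foldl (fun (s : Int × Int × Int) x =>
      if x < m then (s.1 + 1, s.2.1, s.2.2)
      else if m < x then (s.1, s.2.1 + 1, s.2.2)
      else (s.1, s.2.1, s.2.2 + 1)) (a, b, c)
    = (a + ((sample.filter (fun x => x < m)).length : Int),
       b + ((sample.filter (fun x => m < x)).length : Int),
       c + ((sample.length : Int)
            - ((sample.filter (fun x => m < x)).length : Int)
            - ((sample.filter (fun x => x < m)).length : Int))) := by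
  induction sample generalizing a b c with
  | nil => simp
  | cons x xs ih =>
    simp only [List.foldl_cons, List.filter_cons, List.length_cons]
    by_cases h1 : x < m
    · have h2 : ¬ m < x := by omega
      simp only [if_pos h1, ih, h1, h2, decide_true, decide_false, if_true, if_false,
        List.length_cons, ite_false]
      refine Prod.ext ?_ (Prod.ext ?_ ?_) <;> simp <;> push_cast <;> ring
    · by_cases h2 : m < x
      · simp only [if_neg h1, if_pos h2, ih, h1, h2, decide_true, decide_false,
          List.length_cons, ite_true, ite_false]
        refine Prod.ext ?_ (Prod.ext ?_ ?_) <;> simp <;> push_cast <;> ring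
      · simp only [if_neg h1, if_neg h2, ih, h1, h2, decide_false, ite_false]
        refine Prod.ext ?_ (Prod.ext ?_ ?_) <;> simp <;> push_cast <;> ring

-- the two strict filters together never exceed the length
theorem filters_le (m : Int) (sample : List Int) :
    (sample.filter (fun x => m < x)).length + (sample.filter (fun x => x < m)).length
      ≤ sample.length := by
  induction sample with
  | nil => simp
  | cons x xs ih =>
    simp only [List.filter_cons, List.length_cons]
    split_ifs <;> simp_all <;> omega

-- closed form of A's while loop
theorem calcLoopA_closed (z : Nat) : ∀ (p n : Int),
    calcLoopA p n z =
      if n < p then (p, n + min (z : Int) (p - n))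
      else if p < n then (p + min (z : Int) (n - p), n)
      else (p, n) := by
  induction z with
  | zero =>
    intro p n
    simp only [calcLoopA, Nat.cast_zero]
    split_ifs <;> (refine Prod.ext ?_ ?_ <;> simp <;> omega)
  | succ z ih =>
    intro p n
    simp only [calcLoopA, ih]
    push_cast
    split_ifs <;> (refine Prod.ext ?_ ?_ <;> simp <;> omega)

-- ===== VERDICT (by name: the statement is the Claim_ definition above) =====
theorem calculate_d_i_spec : Claim_equal_calculate_d_i := by
  intro sample m _
  unfold Spec_calculate_d_i calculate_d_i calculate_d_i_alt
  simp only [calc_fold_eq m sample 0 0 0, zero_add]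
  set cp : Int := ((sample.filter (fun x => m < x)).length : Int) with hcp
  set cn : Int := ((sample.filter (fun x => x < m)).length : Int) with hcn
  set cz : Int := (sample.length : Int) - cp - cn with hcz
  have hzn : 0 ≤ cz := by
    have h := filters_le m sample
    rw [hcz, hcp, hcn]; push_cast; omega
  have htn : ((cz.toNat : Int)) = cz := Int.toNat_of_nonneg hzn
  by_cases hz : cz = 0
  · rw [if_pos hz]
    split_ifs with h1 h2
    · refine Prod.ext ?_ ?_ <;> simp <;> omega
    · refine Prod.ext ?_ ?_ <;> simp <;> omega
    · rfl
  · rw [if_neg hz, calcLoopA_closed, htn]
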